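-- pv_equiv track=rewrite | github.com/cryptoxdog/golden-repo | tools/review/build_context.py | infer_change_type
-- ===== SOURCE A (Python) =====
-- def infer_change_type(changed_files: list[str]) -> str:
--     if any(path.startswith(".github/workflows/") for path in changed_files):
--         return "workflow_change"
--     if "spec.yaml" in changed_files or any(
--         path.startswith("domains/") and path.endswith("/spec.yaml") for path in changed_files
--     ):
--         return "spec_change"
--     if any(
--         path.startswith("tools/review/policy/") or path.endswith((".yaml", ".yml", ".json"))
--         for path in changed_files
--     ):
--         return "config_change"
--     return "code_change"
-- ===== SOURCE B (Python) =====
-- _LABELS = ("code_change", "config_change", "spec_change", "workflow_change")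
--
--
-- def _rank(path: str) -> int:
--     """Severity of a single changed path: workflow > spec > config > code."""
--     if path.startswith(".github/workflows/"):
--         return 3
--     if path == "spec.yaml" or (path.startswith("domains/") and path.endswith("/spec.yaml")):
--         return 2
--     if path.startswith("tools/review/policy/") or path.endswith((".yaml", ".yml", ".json")):
--         return 1
--     return 0
--
--
-- def infer_change_type(changed_files: list[str]) -> str:
--     return _LABELS[max(map(_rank, changed_files), default=0)]
-- ===== Notes on version B (the rewrite author's own statement) =====
-- stated objective: alternative
-- what changed: Instead of A's up-to-three whole-list any() scans with early returns, B classifies each path once into a numeric severity rank (workflow=3 > spec=2 > config=1 > code=0), reduces the list with max, and looks the answer up in a label table.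
import Mathlib
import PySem

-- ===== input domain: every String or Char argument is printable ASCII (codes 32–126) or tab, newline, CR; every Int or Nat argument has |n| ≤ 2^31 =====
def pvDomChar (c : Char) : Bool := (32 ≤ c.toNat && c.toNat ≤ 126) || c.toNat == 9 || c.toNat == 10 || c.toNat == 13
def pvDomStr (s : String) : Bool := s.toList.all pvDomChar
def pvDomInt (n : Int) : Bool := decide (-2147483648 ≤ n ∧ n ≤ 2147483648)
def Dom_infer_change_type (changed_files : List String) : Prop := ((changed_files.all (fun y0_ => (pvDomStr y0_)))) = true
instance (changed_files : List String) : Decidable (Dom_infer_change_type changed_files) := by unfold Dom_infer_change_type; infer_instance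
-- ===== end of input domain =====

-- B replaces A's staged any() scans by ranking each path once (workflow=3 > spec=2 > config=1 > code=0), taking the max rank, and indexing a label table; same classification.

-- ===== PORT A =====
def infer_change_type (changed_files : List String) : String :=
  if changed_files.any (fun path => PySem.Str.startswith path ".github/workflows/") then
    "workflow_change"
  else if changed_files.contains "spec.yaml"
      || changed_files.any (fun path =>
            PySem.Str.startswith path "domains/" && PySem.Str.endswith path "/spec.yaml") then
    "spec_change"
  else if changed_files.any (fun path =>
            PySem.Str.startswith path "tools/review/policy/"
            || (PySem.Str.endswith path ".yaml" || PySem.Str.endswith path ".yml"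
                || PySem.Str.endswith path ".json")) then
    "config_change"
  else
    "code_change"

-- ===== PORT B =====
def pvLabels : List String := ["code_change", "config_change", "spec_change", "workflow_change"]

def pvRank (path : String) : Nat :=
  if PySem.Str.startswith path ".github/workflows/" then 3
  else if path == "spec.yaml"
      || (PySem.Str.startswith path "domains/" && PySem.Str.endswith path "/spec.yaml") then 2
  else if PySem.Str.startswith path "tools/review/policy/"
      || (PySem.Str.endswith path ".yaml" || PySem.Str.endswith path ".yml"
          || PySem.Str.endswith path ".json") then 1
  else 0

def infer_change_type_alt (changed_files : List String) : String :=
  -- max(map(_rank, changed_files), default=0); the index is always < 4, so the getD default is unreachable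
  pvLabels.getD ((changed_files.map pvRank).foldl Nat.max 0) ""

-- ===== PRECONDITION & SPEC =====
def Spec_infer_change_type (changed_files : List String) (out : String) : Prop := out = infer_change_type_alt changed_files
instance (changed_files : List String) (out : String) : Decidable (Spec_infer_change_type changed_files out) := by unfold Spec_infer_change_type; infer_instance

-- ===== CLAIM (what is proved, stated in full; the proofs are below) =====
def Claim_equal_infer_change_type : Prop := ∀ (changed_files : List String), Dom_infer_change_type changed_files → Spec_infer_change_type changed_files (infer_change_type changed_files)

-- ===== LEMMAS AND PROOFS =====
def pvW (p : String) : Bool := PySem.Str.startswith p ".github/workflows/"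
def pvS (p : String) : Bool :=
  p == "spec.yaml" || (PySem.Str.startswith p "domains/" && PySem.Str.endswith p "/spec.yaml")
def pvC (p : String) : Bool :=
  PySem.Str.startswith p "tools/review/policy/"
    || (PySem.Str.endswith p ".yaml" || PySem.Str.endswith p ".yml"
        || PySem.Str.endswith p ".json")

theorem pvRank_eq (p : String) :
    pvRank p = if pvW p then 3 else if pvS p then 2 else if pvC p then 1 else 0 := rfl

theorem pvFoldl_max_acc (l : List Nat) (a : Nat) :
    l.foldl Nat.max a = Nat.max a (l.foldl Nat.max 0) := by
  induction l generalizing a with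
  | nil => simp
  | cons h t ih =>
      simp only [List.foldl_cons]
      rw [ih (Nat.max a h), ih (Nat.max 0 h)]
      simp [Nat.max_assoc]

theorem pvMaxRank (l : List String) :
    (l.map pvRank).foldl Nat.max 0 =
      if l.any pvW then 3 else if l.any pvS then 2 else if l.any pvC then 1 else 0 := by
  induction l with
  | nil => simp
  | cons h t ih =>
      simp only [List.map_cons, List.foldl_cons, List.any_cons]
      rw [pvFoldl_max_acc, ih, pvRank_eq]
      by_cases hw : pvW h <;> by_cases hs : pvS h <;> by_cases hc : pvC h <;>
        simp [hw, hs, hc] <;> split_ifs <;> first | rfl | omega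

theorem pvAnyOr (l : List String) (p q : String → Bool) :
    l.any (fun x => p x || q x) = (l.any p || l.any q) := by
  induction l with
  | nil => simp
  | cons h t ih => cases hp : p h <;> cases hq : q h <;> simp [ih, hp, hq]

-- ===== VERDICT (by name: the statement is the Claim_ definition above) =====
theorem infer_change_type_spec : Claim_equal_infer_change_type := by
  intro changed_files _
  unfold Spec_infer_change_type infer_change_type infer_change_type_alt
  rw [pvMaxRank]
  have hc : (changed_files.contains "spec.yaml"
      || changed_files.any (fun path =>
            PySem.Str.startswith path "domains/" && PySem.Str.endswith path "/spec.yaml"))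
      = changed_files.any pvS := by
    rw [List.contains_eq_any_beq]
    have : changed_files.any (fun x => "spec.yaml" == x)
        = changed_files.any (fun path => path == "spec.yaml") := by
      simp [List.any_eq, BEq.comm]
    rw [this, ← pvAnyOr]
    rfl
  rw [hc,
    show (changed_files.any fun path => PySem.Str.startswith path ".github/workflows/")
        = changed_files.any pvW from rfl,
    show (changed_files.any fun path =>
            PySem.Str.startswith path "tools/review/policy/"
            || (PySem.Str.endswith path ".yaml" || PySem.Str.endswith path ".yml"
                || PySem.Str.endswith path ".json"))
        = changed_files.any pvC from rfl]
  by_cases hw : changed_files.any pvW <;>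
    by_cases hs : changed_files.any pvS <;>
    by_cases hc2 : changed_files.any pvC <;>
      simp [hw, hs, hc2, pvLabels]
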